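-- pv_equiv track=rewrite | github.com/zy1o/ogx | scripts/check_openai_responses_drift.py | _check_field_drift
-- ===== SOURCE A (Python) =====
-- INTENTIONAL_FIELD_DIVERGENCES: dict[tuple[str, str], str] = {
--     # OGX uses Pydantic model_validator instead of spec-level validation
--     ("InputFileContent", "file_data"): "OGX adds file_data field for inline file content",
--     ("InputFileContent", "file_url"): "OGX adds file_url field for URL-based file content",
--     # OGX combines InputMessage + InputMessageResource into one model
--     ("InputMessage", "id"): "OGX merges InputMessage and InputMessageResource into one model",
--     # WebSearchToolCall has extra fields in spec that OGX omits
--     ("WebSearchToolCall", "action"): "OGX does not surface search action details",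
--     # FunctionToolCall has namespace in spec, OGX omits it
--     ("FunctionToolCall", "namespace"): "OGX does not support function namespaces",
--     # OutputMessage has phase field in spec, OGX omits it
--     ("OutputMessage", "phase"): "OGX does not support message phases",
--     # OpenAI MCP tool has additional fields OGX handles differently
--     ("MCPTool", "server_url"): "OGX uses server_url on input tool, not output tool",
--     ("MCPTool", "headers"): "OGX handles headers on input tool",
--     ("MCPTool", "require_approval"): "OGX handles require_approval on input tool",
--     ("MCPTool", "connector_id"): "OGX handles connector_id on input tool only",
--     ("MCPTool", "authorization"): "OGX handles authorization on input tool only",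
--     # MCPApprovalResponse spec has request_id, OGX uses approval_request_id
--     ("MCPApprovalResponse", "request_id"): "OGX uses approval_request_id instead",
--     # OGX adds response_id to some streaming events for convenience
--     ("ResponseOutputItemAddedEvent", "response_id"): "OGX adds response_id for event correlation",
--     ("ResponseOutputItemDoneEvent", "response_id"): "OGX adds response_id for event correlation",
--     ("ResponseContentPartAddedEvent", "response_id"): "OGX adds response_id for event correlation",
--     ("ResponseContentPartDoneEvent", "response_id"): "OGX adds response_id for event correlation",
-- }
--
-- def _check_field_drift(
--     spec_name: str,
--     pydantic_name: str,
--     spec_props: set[str],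
--     pydantic_fields: set[str],
-- ) -> tuple[list[dict[str, str]], list[dict[str, str]]]:
--     """Compare fields between spec and Pydantic model. Return (missing, extra) as structured dicts."""
--     missing = []
--     extra = []
--
--     for field in sorted(spec_props - pydantic_fields):
--         if (spec_name, field) in INTENTIONAL_FIELD_DIVERGENCES:
--             continue
--         missing.append({"spec_schema": spec_name, "field": field, "pydantic_model": pydantic_name})
--
--     for field in sorted(pydantic_fields - spec_props):
--         if (spec_name, field) in INTENTIONAL_FIELD_DIVERGENCES:
--             continue
--         extra.append({"spec_schema": spec_name, "field": field, "pydantic_model": pydantic_name})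
--
--     return missing, extra
-- ===== SOURCE B (Python) =====
-- INTENTIONAL_FIELD_DIVERGENCES: dict[tuple[str, str], str] = {
--     ("InputFileContent", "file_data"): "OGX adds file_data field for inline file content",
--     ("InputFileContent", "file_url"): "OGX adds file_url field for URL-based file content",
--     ("InputMessage", "id"): "OGX merges InputMessage and InputMessageResource into one model",
--     ("WebSearchToolCall", "action"): "OGX does not surface search action details",
--     ("FunctionToolCall", "namespace"): "OGX does not support function namespaces",
--     ("OutputMessage", "phase"): "OGX does not support message phases",
--     ("MCPTool", "server_url"): "OGX uses server_url on input tool, not output tool",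
--     ("MCPTool", "headers"): "OGX handles headers on input tool",
--     ("MCPTool", "require_approval"): "OGX handles require_approval on input tool",
--     ("MCPTool", "connector_id"): "OGX handles connector_id on input tool only",
--     ("MCPTool", "authorization"): "OGX handles authorization on input tool only",
--     ("MCPApprovalResponse", "request_id"): "OGX uses approval_request_id instead",
--     ("ResponseOutputItemAddedEvent", "response_id"): "OGX adds response_id for event correlation",
--     ("ResponseOutputItemDoneEvent", "response_id"): "OGX adds response_id for event correlation",
--     ("ResponseContentPartAddedEvent", "response_id"): "OGX adds response_id for event correlation",
--     ("ResponseContentPartDoneEvent", "response_id"): "OGX adds response_id for event correlation",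
-- }
--
-- def _check_field_drift(
--     spec_name: str,
--     pydantic_name: str,
--     spec_props: set[str],
--     pydantic_fields: set[str],
-- ) -> tuple[list[dict[str, str]], list[dict[str, str]]]:
--     """Sort each side once, then a two-pointer merge scan finds the one-sided
--     fields in sorted order without computing any set difference."""
--     sp = sorted(spec_props)
--     pf = sorted(pydantic_fields)
--     only_spec: list[str] = []
--     only_pyd: list[str] = []
--     i = j = 0
--     while i < len(sp) and j < len(pf):
--         if sp[i] == pf[j]:
--             i += 1
--             j += 1
--         elif sp[i] < pf[j]:
--             only_spec.append(sp[i])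
--             i += 1
--         else:
--             only_pyd.append(pf[j])
--             j += 1
--     only_spec.extend(sp[i:])
--     only_pyd.extend(pf[j:])
--
--     def row(f: str) -> dict[str, str]:
--         return {"spec_schema": spec_name, "field": f, "pydantic_model": pydantic_name}
--
--     missing = [row(f) for f in only_spec
--                if (spec_name, f) not in INTENTIONAL_FIELD_DIVERGENCES]
--     extra = [row(f) for f in only_pyd
--              if (spec_name, f) not in INTENTIONAL_FIELD_DIVERGENCES]
--     return missing, extra
-- ===== Notes on version B (the rewrite author's own statement) =====
-- stated objective: alternative
-- what changed: B never computes a set difference: it sorts each field set once and runs a linear two-pointer merge scan over the two sorted lists, collecting the one-sided fields in order, then builds the missing/extra records from those lists.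
import Mathlib
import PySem

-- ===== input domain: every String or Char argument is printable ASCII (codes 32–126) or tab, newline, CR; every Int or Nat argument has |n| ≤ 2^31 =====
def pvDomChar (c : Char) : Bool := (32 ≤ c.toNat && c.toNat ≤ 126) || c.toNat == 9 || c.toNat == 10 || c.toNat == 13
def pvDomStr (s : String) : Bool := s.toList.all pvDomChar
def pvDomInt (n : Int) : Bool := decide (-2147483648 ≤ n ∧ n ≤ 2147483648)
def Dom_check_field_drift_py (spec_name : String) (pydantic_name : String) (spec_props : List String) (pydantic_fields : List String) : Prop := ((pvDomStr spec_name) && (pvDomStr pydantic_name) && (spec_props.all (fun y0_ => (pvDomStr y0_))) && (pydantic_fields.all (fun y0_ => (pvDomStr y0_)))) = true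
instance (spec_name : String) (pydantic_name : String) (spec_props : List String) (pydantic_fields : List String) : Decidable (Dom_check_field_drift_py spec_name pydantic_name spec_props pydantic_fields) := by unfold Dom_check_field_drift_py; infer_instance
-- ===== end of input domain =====

-- B replaces A's two set-difference-then-sort passes by sorting each field set once and running a
-- two-pointer merge scan that collects the one-sided fields; same cost, different algorithm (return value only).

-- shared source constant: the INTENTIONAL_FIELD_DIVERGENCES keys (the messages are never read)
def pvDivergences : List (String × String) :=
  [("InputFileContent", "file_data"), ("InputFileContent", "file_url"),
   ("InputMessage", "id"), ("WebSearchToolCall", "action"),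
   ("FunctionToolCall", "namespace"), ("OutputMessage", "phase"),
   ("MCPTool", "server_url"), ("MCPTool", "headers"),
   ("MCPTool", "require_approval"), ("MCPTool", "connector_id"),
   ("MCPTool", "authorization"), ("MCPApprovalResponse", "request_id"),
   ("ResponseOutputItemAddedEvent", "response_id"), ("ResponseOutputItemDoneEvent", "response_id"),
   ("ResponseContentPartAddedEvent", "response_id"), ("ResponseContentPartDoneEvent", "response_id")]

-- {"spec_schema": …, "field": …, "pydantic_model": …} as an association list
def pvRow (spec_name : String) (pydantic_name : String) (field : String) : List (String × String) :=
  [("spec_schema", spec_name), ("field", field), ("pydantic_model", pydantic_name)]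

-- ===== PORT A =====
def check_field_drift_py (spec_name : String) (pydantic_name : String) (spec_props : List String) (pydantic_fields : List String) : (List (List (String × String))) × (List (List (String × String))) :=
  let missing :=
    (PySem.List.sorted (PySem.Set.diff (PySem.Set.ofList spec_props) (PySem.Set.ofList pydantic_fields)) (fun x => x) false).foldl
      (fun acc field =>
        if pvDivergences.contains (spec_name, field) then acc
        else acc ++ [pvRow spec_name pydantic_name field]) []
  let extra :=
    (PySem.List.sorted (PySem.Set.diff (PySem.Set.ofList pydantic_fields) (PySem.Set.ofList spec_props)) (fun x => x) false).foldl
      (fun acc field =>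
        if pvDivergences.contains (spec_name, field) then acc
        else acc ++ [pvRow spec_name pydantic_name field]) []
  (missing, extra)

-- ===== PORT B =====
-- the while loop of Source B (two pointers) plus the two trailing extends, as structural recursion
def pvMerge : List String → List String → List String × List String
  | [], ys => ([], ys)
  | x :: xs, [] => (x :: xs, [])
  | x :: xs, y :: ys =>
    if x == y then pvMerge xs ys
    else if x < y then
      let r := pvMerge xs (y :: ys); (x :: r.1, r.2)
    else
      let r := pvMerge (x :: xs) ys; (r.1, y :: r.2)

def check_field_drift_py_alt (spec_name : String) (pydantic_name : String) (spec_props : List String) (pydantic_fields : List String) : (List (List (String × String))) × (List (List (String × String))) :=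
  let sp := PySem.List.sorted (PySem.Set.ofList spec_props) (fun x => x) false
  let pf := PySem.List.sorted (PySem.Set.ofList pydantic_fields) (fun x => x) false
  let r := pvMerge sp pf
  let missing := (r.1.filter (fun f => !pvDivergences.contains (spec_name, f))).map
      (fun f => pvRow spec_name pydantic_name f)
  let extra := (r.2.filter (fun f => !pvDivergences.contains (spec_name, f))).map
      (fun f => pvRow spec_name pydantic_name f)
  (missing, extra)

-- ===== PRECONDITION & SPEC =====
def Spec_check_field_drift_py (spec_name : String) (pydantic_name : String) (spec_props : List String) (pydantic_fields : List String) (out : (List (List (String × String))) × (List (List (String × String)))) : Prop := out = check_field_drift_py_alt spec_name pydantic_name spec_props pydantic_fields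
instance (spec_name : String) (pydantic_name : String) (spec_props : List String) (pydantic_fields : List String) (out : (List (List (String × String))) × (List (List (String × String)))) : Decidable (Spec_check_field_drift_py spec_name pydantic_name spec_props pydantic_fields out) := by unfold Spec_check_field_drift_py; infer_instance

-- ===== CLAIM (what is proved, stated in full; the proofs are below) =====
def Claim_equal_check_field_drift_py : Prop := ∀ (spec_name : String) (pydantic_name : String) (spec_props : List String) (pydantic_fields : List String), Dom_check_field_drift_py spec_name pydantic_name spec_props pydantic_fields → Spec_check_field_drift_py spec_name pydantic_name spec_props pydantic_fields (check_field_drift_py spec_name pydantic_name spec_props pydantic_fields)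

-- ===== LEMMAS AND PROOFS =====

-- A's loop: skip-on-flag append is a filter-and-map
lemma pv_foldl_skip_if {α β : Type} (q : α → Bool) (f : α → β) (l : List α) (acc : List β) :
    l.foldl (fun acc x => if q x then acc else acc ++ [f x]) acc
      = acc ++ (l.filter (fun x => !q x)).map f := by
  rw [← PySem.List.foldl_append_if]
  apply PySem.List.foldl_congr_mem
  intro acc x _
  cases h : q x
  · simp_all
  · simp_all


-- the merge scan on strictly increasing lists yields the two one-sided filters
lemma pv_merge_eq : ∀ (xs ys : List String), xs.Pairwise (· < ·) → ys.Pairwise (· < ·) →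
    pvMerge xs ys = (xs.filter (fun a => !ys.contains a), ys.filter (fun a => !xs.contains a))
  | [], ys, _, _ => by simp [pvMerge]
  | x :: xs, [], _, _ => by simp [pvMerge]
  | x :: xs, y :: ys, hx, hy => by
    have hxlt : ∀ a ∈ xs, x < a := fun a ha => (List.pairwise_cons.mp hx).1 a ha
    have hylt : ∀ a ∈ ys, y < a := fun a ha => (List.pairwise_cons.mp hy).1 a ha
    have hx' := (List.pairwise_cons.mp hx).2
    have hy' := (List.pairwise_cons.mp hy).2
    by_cases hxy : x = y
    · subst hxy
      have ih := pv_merge_eq xs ys hx' hy'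
      have hMM : pvMerge (x :: xs) (x :: ys) = pvMerge xs ys := by simp [pvMerge]
      have h1 : List.filter (fun a => !(x :: ys).contains a) (x :: xs)
          = List.filter (fun a => !ys.contains a) xs := by
        rw [List.filter_cons_of_neg (by simp)]
        apply List.filter_congr
        intro a ha
        have hax : a ≠ x := fun h => absurd (h ▸ hxlt a ha) (lt_irrefl x)
        simp
        try exact fun _ => hax
      have h2 : List.filter (fun a => !(x :: xs).contains a) (x :: ys)
          = List.filter (fun a => !xs.contains a) ys := by
        rw [List.filter_cons_of_neg (by simp)]
        apply List.filter_congr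
        intro a ha
        have hax : a ≠ x := fun h => absurd (h ▸ hylt a ha) (lt_irrefl x)
        simp
        try exact fun _ => hax
      rw [hMM, ih, h1, h2]
    · have hne : (x == y) = false := beq_eq_false_iff_ne.mpr hxy
      by_cases hlt : x < y
      · have ih := pv_merge_eq xs (y :: ys) hx' hy
        have hMM : pvMerge (x :: xs) (y :: ys)
            = (x :: (pvMerge xs (y :: ys)).1, (pvMerge xs (y :: ys)).2) := by
          simp [pvMerge, hne, hlt]
        have hxmem : x ∉ (y :: ys) := by
          intro h
          rcases List.mem_cons.mp h with h | h
          · exact absurd (h ▸ hlt) (lt_irrefl _)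
          · exact absurd (lt_trans hlt (hylt x h)) (lt_irrefl _)
        have h1 : List.filter (fun a => !(y :: ys).contains a) (x :: xs)
            = x :: List.filter (fun a => !(y :: ys).contains a) xs := by
          rw [List.filter_cons_of_pos (by simp [hxmem])]
        have h2 : List.filter (fun a => !(x :: xs).contains a) (y :: ys)
            = List.filter (fun a => !xs.contains a) (y :: ys) := by
          apply List.filter_congr
          intro a ha
          have hya : y ≤ a := by
            rcases List.mem_cons.mp ha with h | h
            · exact le_of_eq h.symm
            · exact le_of_lt (hylt a h)
          have hax : a ≠ x := fun h => absurd (lt_of_lt_of_le hlt (h ▸ hya)) (lt_irrefl _)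
          simp
          try exact fun _ => hax
        rw [hMM, ih, h1, h2]
      · have hgt : y < x := lt_of_le_of_ne (le_of_not_gt hlt) (fun h => hxy h.symm)
        have ih := pv_merge_eq (x :: xs) ys hx hy'
        have hMM : pvMerge (x :: xs) (y :: ys)
            = ((pvMerge (x :: xs) ys).1, y :: (pvMerge (x :: xs) ys).2) := by
          simp [pvMerge, hne, hlt]
        have hymem : y ∉ (x :: xs) := by
          intro h
          rcases List.mem_cons.mp h with h | h
          · exact absurd (h ▸ hgt) (lt_irrefl _)
          · exact absurd (lt_trans hgt (hxlt y h)) (lt_irrefl _)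
        have h2 : List.filter (fun a => !(x :: xs).contains a) (y :: ys)
            = y :: List.filter (fun a => !(x :: xs).contains a) ys := by
          rw [List.filter_cons_of_pos (by simp [hymem])]
        have h1 : List.filter (fun a => !(y :: ys).contains a) (x :: xs)
            = List.filter (fun a => !ys.contains a) (x :: xs) := by
          apply List.filter_congr
          intro a ha
          have hxa : x ≤ a := by
            rcases List.mem_cons.mp ha with h | h
            · exact le_of_eq h.symm
            · exact le_of_lt (hxlt a h)
          have hax : a ≠ y := fun h => absurd (lt_of_lt_of_le hgt (h ▸ hxa)) (lt_irrefl _)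
          simp
          try exact fun _ => hax
        rw [hMM, ih, h1, h2]

-- A's sorted set difference is the one-sided filter of the sorted sets
lemma pv_sortedDiff (sp pf : List String) :
    PySem.List.sorted (PySem.Set.diff (PySem.Set.ofList sp) (PySem.Set.ofList pf)) (fun x => x) false
      = (PySem.List.sorted (PySem.Set.ofList sp) (fun x => x) false).filter
          (fun a => !(PySem.List.sorted (PySem.Set.ofList pf) (fun x => x) false).contains a) := by
  apply PySem.List.sorted_eq_of_perm_of_pairwise_lt
  · -- the filtered sorted list is a permutation of the set difference
    have hmemf : ∀ a, a ∈ (PySem.List.sorted (PySem.Set.ofList sp) (fun x => x) false).filter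
        (fun a => !(PySem.List.sorted (PySem.Set.ofList pf) (fun x => x) false).contains a)
        ↔ a ∈ PySem.Set.diff (PySem.Set.ofList sp) (PySem.Set.ofList pf) := by
      intro a
      simp [List.mem_filter, PySem.List.mem_sorted, PySem.Set.mem_diff]
    have hnd1 : ((PySem.List.sorted (PySem.Set.ofList sp) (fun x => x) false).filter
        (fun a => !(PySem.List.sorted (PySem.Set.ofList pf) (fun x => x) false).contains a)).Nodup :=
      List.Nodup.filter _
        ((PySem.List.sorted_perm (xs := PySem.Set.ofList sp) (key := fun x => x) false).nodup_iff.mpr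
          (PySem.Set.nodup_ofList _))
    have hnd2 : (PySem.Set.diff (PySem.Set.ofList sp) (PySem.Set.ofList pf)).Nodup :=
      PySem.Set.nodup_diff _ _ (PySem.Set.nodup_ofList _)
    exact (List.perm_ext_iff_of_nodup hnd1 hnd2).mpr hmemf
  · exact List.Pairwise.sublist List.filter_sublist (PySem.List.sorted_ofList_pairwise_lt sp)

-- ===== VERDICT (by name: the statement is the Claim_ definition above) =====
theorem check_field_drift_py_spec : Claim_equal_check_field_drift_py := by
  intro spec_name pydantic_name sp pf _
  show check_field_drift_py _ _ _ _ = check_field_drift_py_alt _ _ _ _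
  simp only [check_field_drift_py, check_field_drift_py_alt]
  rw [pv_foldl_skip_if, pv_foldl_skip_if,
      pv_merge_eq _ _ (PySem.List.sorted_ofList_pairwise_lt sp) (PySem.List.sorted_ofList_pairwise_lt pf),
      pv_sortedDiff sp pf, pv_sortedDiff pf sp]
  simp
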